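-- pv_equiv track=rewrite | github.com/mishajw/euler | p0027.py | get_num_consecutive
-- ===== SOURCE A (Python) =====
-- from itertools import count, takewhile
--
-- def is_prime(n: int) -> bool:
--     if n <= 1:
--         return False
--     for i in range(2, n // 2):
--         if n % i == 0:
--             return False
--     return True
--
-- def get_num_consecutive(a: int, b: int) -> int:
--     return len(
--         list(
--             takewhile(
--                 is_prime,
--                 (n**2 + a * n + b for n in count()),
--             )
--         )
--     )
-- ===== SOURCE B (Python) =====
-- def _isqrt(v):
--     r = 0
--     while (r + 1) * (r + 1) <= v:
--         r += 1
--     return r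
--
--
-- def _is_prime(v):
--     return v >= 2 and all(v % d != 0 for d in range(2, _isqrt(v) + 1))
--
--
-- def get_num_consecutive(a, b):
--     n = 0
--     while _is_prime(n * n + a * n + b):
--         n += 1
--     return n
-- ===== Notes on version B (the rewrite author's own statement) =====
-- stated objective: faster
-- what changed: B replaces A's takewhile-over-generator whose is_prime scans every divisor below v//2 by a counting loop whose primality test is an all() over range(2, isqrt(v)+1) with a hand-rolled integer square root, and B's test is correct at v=4 where A's is wrong.
-- intended difference: On inputs (a,b) where n^2+a*n+b equals 4 for some n whose earlier values are all genuinely prime (e.g. b=4), A's is_prime wrongly accepts 4 (its divisor loop ranges over [2, 4//2) which is empty), so A counts past that n and returns a larger count, while B stops there and returns the number of genuinely prime values, which is the intended behaviour. — e.g. on get_num_consecutive(0, 4): A returns 2, B returns 0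
import Mathlib
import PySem

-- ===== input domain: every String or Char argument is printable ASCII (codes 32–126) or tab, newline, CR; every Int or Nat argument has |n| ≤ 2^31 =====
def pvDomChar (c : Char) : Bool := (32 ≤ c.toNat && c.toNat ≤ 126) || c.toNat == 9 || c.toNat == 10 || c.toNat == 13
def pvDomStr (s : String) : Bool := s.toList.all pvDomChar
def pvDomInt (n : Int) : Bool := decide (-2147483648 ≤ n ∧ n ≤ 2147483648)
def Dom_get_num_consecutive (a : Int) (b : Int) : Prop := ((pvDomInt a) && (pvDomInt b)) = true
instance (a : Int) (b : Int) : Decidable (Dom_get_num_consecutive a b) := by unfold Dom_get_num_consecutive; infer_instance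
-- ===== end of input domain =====

-- B replaces A's takewhile/len pipeline whose is_prime scans every divisor below v//2 by a counting
-- while-loop whose test is an all() over range(2, isqrt(v)+1) with a hand-rolled integer square root;
-- B is correct at the value 4, where A's test is wrong (see D_ below).
-- The unbounded Python loops are ported with explicit fuel (exact iteration counts for the bounded
-- loops, the constant pvFuel for the outer whiles); the fuel only makes the recursions structurally total.

-- ===== PORT A =====
-- 'for i in range(2, n // 2): if n % i == 0: return False' / 'return True'
-- (fuel = number of remaining range elements, so the recursion is structural and exact)
def pvIsPrimeLoopA (n : Int) : Nat → Int → Bool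
  | 0, _ => true
  | fuel + 1, i =>
    if i < PySem.Int.floordiv n 2 then
      if PySem.Int.mod n i == 0 then false else pvIsPrimeLoopA n fuel (i + 1)
    else true

def pvIsPrimeA (n : Int) : Bool :=
  if n ≤ 1 then false else pvIsPrimeLoopA n (PySem.Int.floordiv n 2 - 2).toNat 2

def pvFuel : Nat := 8589934592  -- 2^33: structural bound for the unbounded outer loops

-- len(list(takewhile(is_prime, (n**2 + a*n + b for n in count()))))
def pvTakewhileLen (p : Int → Bool) : Nat → Int → Int
  | 0, n => n
  | fuel + 1, n => if p n then pvTakewhileLen p fuel (n + 1) else n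

def get_num_consecutive (a : Int) (b : Int) : Int :=
  pvTakewhileLen (fun n => pvIsPrimeA (n ^ 2 + a * n + b)) pvFuel 0

-- ===== PORT B =====
-- '_isqrt: r = 0; while (r+1)*(r+1) <= v: r += 1; return r' (fuel v.toNat exceeds the trip count)
def pvIsqrtGo (v : Int) : Nat → Int → Int
  | 0, r => r
  | fuel + 1, r => if (r + 1) * (r + 1) ≤ v then pvIsqrtGo v fuel (r + 1) else r

def pvIsqrt (v : Int) : Int := pvIsqrtGo v v.toNat 0

-- 'return v >= 2 and all(v % d != 0 for d in range(2, _isqrt(v) + 1))'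
def pvIsPrimeB (v : Int) : Bool :=
  decide (2 ≤ v) && (PySem.List.pyRange 2 (pvIsqrt v + 1) 1).all (fun d => !(PySem.Int.mod v d == 0))

-- 'n = 0; while _is_prime(n*n + a*n + b): n += 1; return n'
def pvCountB (a : Int) (b : Int) : Nat → Int → Int
  | 0, n => n
  | fuel + 1, n => if pvIsPrimeB (n * n + a * n + b) then pvCountB a b fuel (n + 1) else n

def get_num_consecutive_alt (a : Int) (b : Int) : Int :=
  pvCountB a b pvFuel 0

-- ===== PRECONDITION & SPEC =====
-- On inputs (a,b) where n²+a·n+b = 4 for some n whose earlier values are all genuinely prime,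
-- A's is_prime wrongly accepts 4 (its divisor range [2, 4//2) is empty), so A counts past that n
-- and returns a larger count, while B stops there; B's count of genuinely prime values is intended.
-- (any n with n²+a·n+b = 4 satisfies n < |a|+|b|+5, so the bound only makes D_ checkable)
def D_get_num_consecutive (a : Int) (b : Int) : Prop :=
  ∃ m < a.natAbs + b.natAbs + 5,
    (m : Int) * m + a * m + b = 4 ∧ ∀ k < m, Nat.Prime ((k : Int) * k + a * k + b).toNat

-- kernel-/eval-friendly integer square root by digit recursion (fuel peels one base-4 digit per step);
-- used only to DECIDE D_ in closed form (the quadratic has an integer root iff its discriminant is a square)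
def pvSqrt : Nat → Int → Int
  | 0, _ => 0
  | f + 1, x =>
    if x ≤ 0 then 0
    else
      let r := 2 * pvSqrt f (x / 4)
      if (r + 1) * (r + 1) ≤ x then r + 1 else r

theorem pvSqrt_bracket : ∀ (f : Nat) (x : Int), 0 ≤ x → x < (4:Int) ^ f →
    0 ≤ pvSqrt f x ∧ pvSqrt f x * pvSqrt f x ≤ x ∧ x < (pvSqrt f x + 1) * (pvSqrt f x + 1) := by
  intro f
  induction f with
  | zero =>
    intro x h0 hx
    simp only [pvSqrt]
    simp only [pow_zero] at hx
    omega
  | succ f ih =>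
    intro x h0 hx
    simp only [pvSqrt]
    by_cases hx0 : x ≤ 0
    · simp only [hx0, if_true]; omega
    · simp only [hx0, if_false]
      have hpow : (4:Int) ^ (f + 1) = 4 * 4 ^ f := by ring
      have hq : x / 4 < (4:Int) ^ f := by omega
      obtain ⟨h1, h2, h3⟩ := ih (x / 4) (by omega) hq
      set r0 := pvSqrt f (x / 4) with hr0
      have e1 : (2 * r0 + 2) * (2 * r0 + 2) = 4 * ((r0 + 1) * (r0 + 1)) := by ring
      have e2 : (2 * r0) * (2 * r0) = 4 * (r0 * r0) := by ring
      have e3 : (2 * r0 + 1 + 1) * (2 * r0 + 1 + 1) = 4 * ((r0 + 1) * (r0 + 1)) := by ring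
      have e4 : (2 * r0 + 1) * (2 * r0 + 1) = 4 * (r0 * r0) + 4 * r0 + 1 := by ring
      by_cases hb : (2 * r0 + 1) * (2 * r0 + 1) ≤ x
      · rw [if_pos hb]
        exact ⟨by omega, hb, by omega⟩
      · rw [if_neg hb]
        exact ⟨by omega, by omega, by omega⟩

theorem pvSqrt_sq (f : Nat) (c : Int) (h : c * c < (4:Int) ^ f) :
    pvSqrt f (c * c) = (c.natAbs : Int) := by
  obtain ⟨h1, h2, h3⟩ := pvSqrt_bracket f (c * c) (mul_self_nonneg c) h
  set s := pvSqrt f (c * c) with hs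
  have habs : (c.natAbs : Int) * (c.natAbs : Int) = c * c := by
    exact_mod_cast Int.natAbs_mul_self
  have hN : 0 ≤ (c.natAbs : Int) := Int.natCast_nonneg _
  have hle : s ≤ (c.natAbs : Int) := by nlinarith
  have hge : (c.natAbs : Int) ≤ s := by nlinarith
  omega

theorem pv_lt_pow (d : Int) : d < (4:Int) ^ PySem.Int.bitLength d := by
  have h1 : d.natAbs < 2 ^ PySem.Int.bitLength d := PySem.Int.lt_two_pow_bitLength d
  have h2 : ((2:Int)) ^ PySem.Int.bitLength d ≤ 4 ^ PySem.Int.bitLength d :=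
    pow_le_pow_left₀ (by norm_num) (by norm_num) _
  have h3 : (d.natAbs : Int) < (2:Int) ^ PySem.Int.bitLength d := by exact_mod_cast h1
  omega

-- any nonnegative root of n²+a·n+b = 4 is below |a|+|b|+5
theorem pv_root_bound (a b : Int) (m : Nat) (h : (m : Int) * m + a * m + b = 4) :
    m < a.natAbs + b.natAbs + 5 := by
  by_contra hgt
  push_neg at hgt
  have hm5 : ((a.natAbs : Int)) + (b.natAbs : Int) + 5 ≤ (m : Int) := by exact_mod_cast hgt
  have ha2 : -((a.natAbs : Int)) ≤ a := by omega
  have hb1 : b ≤ (b.natAbs : Int) := by omega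
  have hb2 : -((b.natAbs : Int)) ≤ b := by omega
  have hM1 : 1 ≤ (m : Int) := by omega
  have t1 : (((a.natAbs : Int)) + (b.natAbs : Int) + 5) * m ≤ (m : Int) * m :=
    mul_le_mul_of_nonneg_right hm5 (by omega)
  have t3 : -((a.natAbs : Int)) * m ≤ a * m := mul_le_mul_of_nonneg_right ha2 (by omega)
  have t2 : ((b.natAbs : Int)) + 5 ≤ (((b.natAbs : Int)) + 5) * m :=
    le_mul_of_one_le_right (by omega) hM1
  nlinarith [t1, t2, t3]

-- D_'s search succeeds iff one of the two quadratic-root candidates (-a ± √disc)/2 is a hit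
theorem pvHitIff (a b : Int) :
    (∃ m < a.natAbs + b.natAbs + 5,
        (m : Int) * m + a * m + b = 4 ∧ ∀ k < m, Nat.Prime ((k : Int) * k + a * k + b).toNat)
    ↔ ((((-a + pvSqrt (PySem.Int.bitLength (a * a - 4 * b + 16)) (a * a - 4 * b + 16)) / 2).toNat : Int) *
          (((-a + pvSqrt (PySem.Int.bitLength (a * a - 4 * b + 16)) (a * a - 4 * b + 16)) / 2).toNat) +
          a * (((-a + pvSqrt (PySem.Int.bitLength (a * a - 4 * b + 16)) (a * a - 4 * b + 16)) / 2).toNat) + b = 4 ∧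
        ∀ k < ((-a + pvSqrt (PySem.Int.bitLength (a * a - 4 * b + 16)) (a * a - 4 * b + 16)) / 2).toNat,
          Nat.Prime ((k : Int) * k + a * k + b).toNat) ∨
      ((((-a - pvSqrt (PySem.Int.bitLength (a * a - 4 * b + 16)) (a * a - 4 * b + 16)) / 2).toNat : Int) *
          (((-a - pvSqrt (PySem.Int.bitLength (a * a - 4 * b + 16)) (a * a - 4 * b + 16)) / 2).toNat) +
          a * (((-a - pvSqrt (PySem.Int.bitLength (a * a - 4 * b + 16)) (a * a - 4 * b + 16)) / 2).toNat) + b = 4 ∧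
        ∀ k < ((-a - pvSqrt (PySem.Int.bitLength (a * a - 4 * b + 16)) (a * a - 4 * b + 16)) / 2).toNat,
          Nat.Prime ((k : Int) * k + a * k + b).toNat) := by
  constructor
  · rintro ⟨m, hmb, h4, hpr⟩
    have hdisc : (2 * (m : Int) + a) * (2 * (m : Int) + a) = a * a - 4 * b + 16 := by
      linear_combination 4 * h4
    have hs : pvSqrt (PySem.Int.bitLength (a * a - 4 * b + 16)) (a * a - 4 * b + 16)
        = ((2 * (m : Int) + a).natAbs : Int) := by
      rw [← hdisc]
      exact pvSqrt_sq _ _ (by rw [hdisc]; exact pv_lt_pow _)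
    rcases (by omega :
        2 * (m : Int) = -a + pvSqrt (PySem.Int.bitLength (a * a - 4 * b + 16)) (a * a - 4 * b + 16) ∨
        2 * (m : Int) = -a - pvSqrt (PySem.Int.bitLength (a * a - 4 * b + 16)) (a * a - 4 * b + 16)) with hc | hc
    · left
      have he : ((-a + pvSqrt (PySem.Int.bitLength (a * a - 4 * b + 16)) (a * a - 4 * b + 16)) / 2).toNat = m := by
        omega
      rw [he]; exact ⟨h4, hpr⟩
    · right
      have he : ((-a - pvSqrt (PySem.Int.bitLength (a * a - 4 * b + 16)) (a * a - 4 * b + 16)) / 2).toNat = m := by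
        omega
      rw [he]; exact ⟨h4, hpr⟩
  · rintro (⟨h4, hpr⟩ | ⟨h4, hpr⟩)
    · exact ⟨_, pv_root_bound a b _ h4, h4, hpr⟩
    · exact ⟨_, pv_root_bound a b _ h4, h4, hpr⟩

instance pvDecD_get_num_consecutive (a : Int) (b : Int) : Decidable (D_get_num_consecutive a b) :=
  decidable_of_iff _ (pvHitIff a b).symm


def Spec_get_num_consecutive (a : Int) (b : Int) (out : Int) : Prop :=
  ¬ D_get_num_consecutive a b → out = get_num_consecutive_alt a b
instance (a : Int) (b : Int) (out : Int) : Decidable (Spec_get_num_consecutive a b out) := by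
  unfold Spec_get_num_consecutive; infer_instance

def pvDiffWitness_get_num_consecutive : Int × Int := (0, 4)
def pvDiffWitnessOut_get_num_consecutive : Int × Int := (2, 0)

-- ===== CLAIM (what is proved, stated in full; the proofs are below) =====
def Claim_unchanged_get_num_consecutive : Prop := ∀ (a : Int) (b : Int), Dom_get_num_consecutive a b → Spec_get_num_consecutive a b (get_num_consecutive a b)
def Claim_changed_get_num_consecutive : Prop := Dom_get_num_consecutive (pvDiffWitness_get_num_consecutive.1) (pvDiffWitness_get_num_consecutive.2) ∧ D_get_num_consecutive (pvDiffWitness_get_num_consecutive.1) (pvDiffWitness_get_num_consecutive.2) ∧ get_num_consecutive (pvDiffWitness_get_num_consecutive.1) (pvDiffWitness_get_num_consecutive.2) = pvDiffWitnessOut_get_num_consecutive.1 ∧ get_num_consecutive_alt (pvDiffWitness_get_num_consecutive.1) (pvDiffWitness_get_num_consecutive.2) = pvDiffWitnessOut_get_num_consecutive.2 ∧ pvDiffWitnessOut_get_num_consecutive.1 ≠ pvDiffWitnessOut_get_num_consecutive.2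
def Claim_exact_get_num_consecutive : Prop := ∀ (a : Int) (b : Int), Dom_get_num_consecutive a b → D_get_num_consecutive a b → get_num_consecutive a b ≠ get_num_consecutive_alt a b

-- ===== LEMMAS AND PROOFS =====

theorem pvIsPrimeLoopA_iff (n : Int) :
    ∀ (fuel : Nat) (i : Int), (PySem.Int.floordiv n 2 - i).toNat ≤ fuel →
    (pvIsPrimeLoopA n fuel i = true ↔
      ∀ j : Int, i ≤ j → j < PySem.Int.floordiv n 2 → ¬ (j ∣ n)) := by
  intro fuel
  induction fuel with
  | zero =>
    intro i hf
    simp only [pvIsPrimeLoopA, true_iff]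
    intro j h1 h2
    omega
  | succ fuel ih =>
    intro i hf
    simp only [pvIsPrimeLoopA]
    by_cases hi : i < PySem.Int.floordiv n 2
    · simp only [hi, if_true]
      by_cases hm : PySem.Int.mod n i = 0
      · have hdvd : i ∣ n := (PySem.Int.mod_eq_zero_iff_dvd n i).mp hm
        simp only [hm, beq_self_eq_true, if_true]
        constructor
        · intro h; exact absurd h (by simp)
        · intro h; exact absurd hdvd (h i le_rfl hi)
      · have hne : (PySem.Int.mod n i == 0) = false := by simp [hm]
        simp only [hne, Bool.false_eq_true, if_false]
        rw [ih (i + 1) (by omega)]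
        constructor
        · intro h j hj1 hj2
          by_cases hji : j = i
          · subst hji
            intro hdvd
            exact hm ((PySem.Int.mod_eq_zero_iff_dvd n j).mpr hdvd)
          · exact h j (by omega) hj2
        · intro h j hj1 hj2
          exact h j (by omega) hj2
    · simp only [hi, if_false, true_iff]
      intro j h1 h2
      omega

-- the hand-rolled square-root loop brackets v between s² and (s+1)²
theorem pvIsqrtGo_spec (v : Int) :
    ∀ (fuel : Nat) (r : Int), 0 ≤ r → r * r ≤ v → v < (r + (fuel : Int) + 1) * (r + (fuel : Int) + 1) →
    0 ≤ pvIsqrtGo v fuel r ∧ pvIsqrtGo v fuel r * pvIsqrtGo v fuel r ≤ v ∧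
      v < (pvIsqrtGo v fuel r + 1) * (pvIsqrtGo v fuel r + 1) := by
  intro fuel
  induction fuel with
  | zero =>
    intro r h0 h1 h2
    simp only [pvIsqrtGo]
    refine ⟨h0, h1, ?_⟩
    have hc : r + ((0 : Nat) : Int) + 1 = r + 1 := by push_cast; ring
    rw [hc] at h2
    exact h2
  | succ fuel ih =>
    intro r h0 h1 h2
    simp only [pvIsqrtGo]
    by_cases hb : (r + 1) * (r + 1) ≤ v
    · rw [if_pos hb]
      have hcast : (r + ((fuel + 1 : Nat) : Int) + 1) = (r + 1) + (fuel : Int) + 1 := by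
        push_cast; ring
      rw [hcast] at h2
      exact ih (r + 1) (by omega) hb h2
    · rw [if_neg hb]
      exact ⟨h0, h1, by omega⟩

theorem pvIsqrt_spec (v : Int) (hv : 0 ≤ v) :
    0 ≤ pvIsqrt v ∧ pvIsqrt v * pvIsqrt v ≤ v ∧ v < (pvIsqrt v + 1) * (pvIsqrt v + 1) := by
  unfold pvIsqrt
  refine pvIsqrtGo_spec v v.toNat 0 le_rfl (by omega) ?_
  have : ((v.toNat : Int)) = v := Int.toNat_of_nonneg hv
  nlinarith [this]

-- the all() over range(2, s+1) says: no divisor in [2, s]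
theorem pvAll_iff (v s : Int) :
    ((PySem.List.pyRange 2 (s + 1) 1).all (fun d => !(PySem.Int.mod v d == 0)) = true)
      ↔ ∀ d : Int, 2 ≤ d → d ≤ s → ¬ (d ∣ v) := by
  rw [List.all_eq_true]
  constructor
  · intro h d h1 h2
    have hd := h d (by rw [PySem.List.mem_pyRange_one]; omega)
    simp only [Bool.not_eq_eq_eq_not, Bool.not_true, beq_eq_false_iff_ne, ne_eq] at hd
    intro hdvd
    exact hd ((PySem.Int.mod_eq_zero_iff_dvd v d).mpr hdvd)
  · intro h x hx
    rw [PySem.List.mem_pyRange_one] at hx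
    simp only [Bool.not_eq_eq_eq_not, Bool.not_true, beq_eq_false_iff_ne, ne_eq]
    intro hm
    exact h x hx.1 (by omega) ((PySem.Int.mod_eq_zero_iff_dvd v x).mp hm)

-- absence of divisors up to √v is genuine primality (on Int, for 2 ≤ v)
theorem pvNoDiv_iff_prime (v : Int) (hv : 2 ≤ v) :
    (∀ e : Int, 2 ≤ e → e * e ≤ v → ¬ (e ∣ v)) ↔ Nat.Prime v.toNat := by
  have hvv : ((v.toNat : Int)) = v := Int.toNat_of_nonneg (by omega)
  constructor
  · intro h
    rw [Nat.prime_def_le_sqrt]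
    refine ⟨by omega, ?_⟩
    intro m hm2 hms hdvd
    refine h (m : Int) (by exact_mod_cast hm2) ?_ ?_
    · have : m * m ≤ v.toNat := Nat.le_sqrt.mp hms
      calc ((m : Int)) * m = ((m * m : Nat) : Int) := by push_cast; ring
        _ ≤ ((v.toNat : Int)) := by exact_mod_cast this
        _ = v := hvv
    · rw [← hvv]; exact_mod_cast hdvd
  · intro hprime e he2 hee hdvd
    have he0 : 0 ≤ e := by omega
    have heq : ((e.toNat : Int)) = e := Int.toNat_of_nonneg he0
    have hmm : e.toNat * e.toNat ≤ v.toNat := by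
      have : ((e.toNat * e.toNat : Nat) : Int) ≤ ((v.toNat : Nat) : Int) := by
        push_cast; rw [heq, hvv]; exact hee
      exact_mod_cast this
    have hms : e.toNat ≤ v.toNat.sqrt := Nat.le_sqrt.mpr hmm
    have hdvdN : e.toNat ∣ v.toNat := by
      have : ((e.toNat : Int)) ∣ ((v.toNat : Int)) := by rw [heq, hvv]; exact hdvd
      exact_mod_cast this
    exact (Nat.prime_def_le_sqrt.mp hprime).2 e.toNat (by omega) hms hdvdN

-- B's test is genuine primality
theorem pvIsPrimeB_iff (v : Int) :
    pvIsPrimeB v = true ↔ 2 ≤ v ∧ Nat.Prime v.toNat := by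
  unfold pvIsPrimeB
  rw [Bool.and_eq_true, decide_eq_true_eq, pvAll_iff]
  constructor
  · rintro ⟨hv, h⟩
    refine ⟨hv, (pvNoDiv_iff_prime v hv).mp ?_⟩
    intro e he2 hee
    obtain ⟨hs0, hs1, hs2⟩ := pvIsqrt_spec v (by omega)
    refine h e he2 ?_
    by_contra hgt
    push_neg at hgt
    nlinarith
  · rintro ⟨hv, hprime⟩
    refine ⟨hv, ?_⟩
    intro d h2 hds
    obtain ⟨hs0, hs1, hs2⟩ := pvIsqrt_spec v (by omega)
    have hdd : d * d ≤ v := by nlinarith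
    exact (pvNoDiv_iff_prime v hv).mpr hprime d h2 hdd

-- A's divisor scan over [2, v//2) decides primality, except at v = 4
theorem pvIsPrimeA_nat (p : Nat) (hp : 2 ≤ p) (hne : p ≠ 4) :
    (∀ m : Nat, 2 ≤ m → m < p / 2 → ¬ (m ∣ p)) ↔ p.Prime := by
  constructor
  · intro h
    by_contra hnp
    rcases Nat.lt_or_ge p 6 with h6 | h6
    · interval_cases p
      · exact hnp (by norm_num)
      · exact hnp (by norm_num)
      · exact hne rfl
      · exact hnp (by norm_num)
    · have hmf := Nat.minFac_dvd p
      have hmfp : (Nat.minFac p).Prime := Nat.minFac_prime (by omega)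
      have hm2 : 2 ≤ p.minFac := hmfp.two_le
      have hsq : p.minFac * p.minFac ≤ p := by
        have := Nat.minFac_sq_le_self (by omega) hnp
        nlinarith [this]
      refine h p.minFac hm2 ?_ hmf
      by_contra hge
      push_neg at hge
      have hq3 : 3 ≤ p / 2 := by omega
      have h1 : p / 2 * (p / 2) ≤ p.minFac * p.minFac := Nat.mul_le_mul hge hge
      have h2 : 3 * (p / 2) ≤ p / 2 * (p / 2) := Nat.mul_le_mul_right _ hq3
      omega
  · intro hprime m hm2 hmlt hdvd
    rcases (Nat.Prime.eq_one_or_self_of_dvd hprime m hdvd) with h1 | h1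
    · omega
    · omega

theorem pvIsPrimeA_eq (v : Int) (hv : v ≠ 4) : pvIsPrimeA v = pvIsPrimeB v := by
  by_cases h2 : v ≤ 1
  · have hA : pvIsPrimeA v = false := by
      unfold pvIsPrimeA; simp only [h2, if_true]
    have hB : pvIsPrimeB v = false := by
      cases h : pvIsPrimeB v with
      | false => rfl
      | true => exact absurd ((pvIsPrimeB_iff v).mp h).1 (by omega)
    rw [hA, hB]
  · push_neg at h2
    have hvv : ((v.toNat : Int)) = v := Int.toNat_of_nonneg (by omega)
    rw [Bool.eq_iff_iff]
    unfold pvIsPrimeA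
    rw [if_neg (by omega)]
    rw [pvIsPrimeLoopA_iff v _ 2 le_rfl, pvIsPrimeB_iff]
    have hfl : PySem.Int.floordiv v 2 = ((v.toNat / 2 : Nat) : Int) := by
      rw [← hvv]; exact_mod_cast PySem.Int.floordiv_natCast v.toNat 2
    constructor
    · intro h
      refine ⟨by omega, ?_⟩
      rw [← pvIsPrimeA_nat v.toNat (by omega) (by omega)]
      intro m hm2 hmlt hdvd
      refine h (m : Int) (by exact_mod_cast hm2) ?_ ?_
      · rw [hfl]; exact_mod_cast hmlt
      · rw [← hvv]; exact_mod_cast hdvd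
    · rintro ⟨-, hprime⟩ j hj2 hjlt hdvd
      have hjq : ((j.toNat : Int)) = j := Int.toNat_of_nonneg (by omega)
      have hjlt' : j.toNat < v.toNat / 2 := by
        rw [hfl] at hjlt; omega
      have hdvdN : j.toNat ∣ v.toNat := by
        have : ((j.toNat : Int)) ∣ ((v.toNat : Int)) := by rw [hjq, hvv]; exact hdvd
        exact_mod_cast this
      exact ((pvIsPrimeA_nat v.toNat (by omega) (by omega)).mpr hprime) j.toNat (by omega) hjlt' hdvdN

theorem pv_lockstep (a b : Int) (fuel : Nat) :
    ∀ n : Int, 0 ≤ n →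
    (∀ m : Int, n ≤ m → m * m + a * m + b = 4 →
      ∃ k : Int, n ≤ k ∧ k < m ∧ pvIsPrimeB (k * k + a * k + b) = false) →
    pvTakewhileLen (fun t => pvIsPrimeA (t ^ 2 + a * t + b)) fuel n = pvCountB a b fuel n := by
  induction fuel with
  | zero => intro n _ _; rfl
  | succ fuel ih =>
    intro n hn H
    have h4 : n * n + a * n + b ≠ 4 := by
      intro h
      obtain ⟨k, hk1, hk2, -⟩ := H n le_rfl h
      omega
    have heq : pvIsPrimeA (n ^ 2 + a * n + b) = pvIsPrimeB (n * n + a * n + b) := by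
      rw [pow_two]; exact pvIsPrimeA_eq _ h4
    simp only [pvTakewhileLen, pvCountB, heq]
    by_cases hp : pvIsPrimeB (n * n + a * n + b) = true
    · simp only [hp, if_true]
      refine ih (n + 1) (by omega) ?_
      intro m hm hm4
      obtain ⟨k, hk1, hk2, hk3⟩ := H m (by omega) hm4
      rcases eq_or_lt_of_le hk1 with rfl | hlt
      · rw [hp] at hk3; exact absurd hk3 (by simp)
      · exact ⟨k, by omega, hk2, hk3⟩
    · rw [Bool.not_eq_true] at hp
      simp only [hp, Bool.false_eq_true, if_false]

theorem pvCountB_eq (a b : Int) :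
    ∀ (fuel : Nat) (n m : Int), n ≤ m → (m - n).toNat < fuel →
    (∀ k : Int, n ≤ k → k < m → pvIsPrimeB (k * k + a * k + b) = true) →
    pvIsPrimeB (m * m + a * m + b) = false →
    pvCountB a b fuel n = m := by
  intro fuel
  induction fuel with
  | zero => intro n m _ hf _ _; omega
  | succ fuel ih =>
    intro n m hnm hf hpre hstop
    by_cases hnm' : n = m
    · subst hnm'
      simp only [pvCountB, hstop, Bool.false_eq_true, if_false]
    · have hlt : n < m := lt_of_le_of_ne hnm hnm'
      simp only [pvCountB, hpre n le_rfl hlt, if_true]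
      exact ih (n + 1) m (by omega) (by omega) (fun k hk1 hk2 => hpre k (by omega) hk2) hstop

theorem pvTakewhileLen_ge_self (p : Int → Bool) :
    ∀ (fuel : Nat) (n : Int), n ≤ pvTakewhileLen p fuel n := by
  intro fuel
  induction fuel with
  | zero => intro n; exact le_rfl
  | succ fuel ih =>
    intro n
    simp only [pvTakewhileLen]
    by_cases hp : p n = true
    · simp only [hp, if_true]
      have := ih (n + 1)
      omega
    · rw [if_neg (by simpa using hp)]

theorem pvTakewhileLen_ge (p : Int → Bool) :
    ∀ (j fuel : Nat) (n : Int), j ≤ fuel →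
    (∀ k : Int, n ≤ k → k < n + (j : Int) → p k = true) →
    n + (j : Int) ≤ pvTakewhileLen p fuel n := by
  intro j
  induction j with
  | zero =>
    intro fuel n _ _
    simpa using pvTakewhileLen_ge_self p fuel n
  | succ j ih =>
    intro fuel n hf hpre
    obtain ⟨fuel', rfl⟩ : ∃ f', fuel = f' + 1 := ⟨fuel - 1, by omega⟩
    have hpn : p n = true := hpre n le_rfl (by push_cast; omega)
    simp only [pvTakewhileLen, hpn, if_true]
    have := ih fuel' (n + 1) (by omega) (fun k hk1 hk2 => hpre k (by omega) (by push_cast at hk2 ⊢; omega))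
    push_cast at this ⊢
    omega

-- ===== VERDICT (by name: the statement is the Claim_ definition above) =====
theorem get_num_consecutive_spec : Claim_unchanged_get_num_consecutive := by
  unfold Claim_unchanged_get_num_consecutive Spec_get_num_consecutive
  intro a b _ hND
  unfold get_num_consecutive get_num_consecutive_alt
  refine pv_lockstep a b pvFuel 0 le_rfl ?_
  intro m hm h4
  have hmt : ((m.toNat : Int)) = m := Int.toNat_of_nonneg hm
  have h4' : ((m.toNat : Int)) * m.toNat + a * m.toNat + b = 4 := by rw [hmt]; exact h4
  by_contra hno
  push_neg at hno
  apply hND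
  refine ⟨m.toNat, pv_root_bound a b m.toNat h4', h4', ?_⟩
  intro k hk
  have hkm : (k : Int) < m := by omega
  have htrue : pvIsPrimeB ((k : Int) * k + a * k + b) = true := by
    cases h : pvIsPrimeB ((k : Int) * k + a * k + b) with
    | false => exact absurd h (hno (k : Int) (Int.natCast_nonneg k) hkm)
    | true => rfl
  exact ((pvIsPrimeB_iff _).mp htrue).2

theorem get_num_consecutive_changed : Claim_changed_get_num_consecutive := by
  unfold Claim_changed_get_num_consecutive; decide

theorem get_num_consecutive_tight : Claim_exact_get_num_consecutive := by
  unfold Claim_exact_get_num_consecutive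
  intro a b hDom hD
  obtain ⟨m, hmb, h4, hpr⟩ := hD
  have hDom' : a.natAbs ≤ 2147483648 ∧ b.natAbs ≤ 2147483648 := by
    have := of_decide_eq_true (by
      simpa [Dom_get_num_consecutive, pvDomInt, Bool.and_eq_true, decide_eq_true_eq] using hDom)
    omega
  have h4' := h4
  have hKP : ∀ k : Nat, k < m → 2 ≤ (k : Int) * k + a * k + b ∧
      Nat.Prime ((k : Int) * k + a * k + b).toNat := by
    intro k hk
    have hp1 := hpr k hk
    exact ⟨by have := hp1.two_le; omega, hp1⟩
  have hBeq : get_num_consecutive_alt a b = (m : Int) := by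
    unfold get_num_consecutive_alt
    refine pvCountB_eq a b pvFuel 0 (m : Int) (Int.natCast_nonneg m) ?_ ?_ ?_
    · simp only [pvFuel]; omega
    · intro k hk1 hk2
      have hk0 : ((k.toNat : Int)) = k := Int.toNat_of_nonneg hk1
      have hKPk := hKP k.toNat (by omega)
      rw [hk0] at hKPk
      exact (pvIsPrimeB_iff _).mpr hKPk
    · rw [h4']; decide
  have hAge : ((m : Int)) + 1 ≤ get_num_consecutive a b := by
    unfold get_num_consecutive
    have hmain := pvTakewhileLen_ge (fun t => pvIsPrimeA (t ^ 2 + a * t + b)) (m + 1) pvFuel 0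
      (by simp only [pvFuel]; omega) ?_
    · push_cast at hmain; omega
    · intro k hk1 hk2
      have hk0 : ((k.toNat : Int)) = k := Int.toNat_of_nonneg hk1
      by_cases hkm : k.toNat < m
      · have hKPk := hKP k.toNat hkm
        rw [hk0] at hKPk
        have hne4 : k * k + a * k + b ≠ 4 := by
          intro hc
          rw [hc] at hKPk
          exact absurd hKPk.2 (by decide)
        show pvIsPrimeA (k ^ 2 + a * k + b) = true
        rw [pow_two, pvIsPrimeA_eq _ hne4]
        exact (pvIsPrimeB_iff _).mpr hKPk
      · have hkm' : k = (m : Int) := by push_cast at hk2; omega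
        show pvIsPrimeA (k ^ 2 + a * k + b) = true
        rw [hkm', pow_two, h4']
        decide
  intro hc
  rw [hc, hBeq] at hAge
  omega
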